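-- pv_equiv track=rewrite | github.com/pypi-data/pypi-mirror-403 | packages/fluid-blends/fluid_blends-0.7.1-py3-none-any.whl/blends/stack/view.py | _compute_incoming_degree
-- ===== SOURCE A (Python) =====
-- from enum import IntEnum
--
-- class Degree(IntEnum):
--     ZERO = 0
--     ONE = 1
--     MULTIPLE = 2
--
-- def _compute_incoming_degree(
--     outgoing: list[list[tuple[int, int]]], node_count: int
-- ) -> list[Degree]:
--     incoming_counts: list[int] = [0] * node_count
--     for edges in outgoing:
--         for sink_index, _ in edges:
--             incoming_counts[sink_index] += 1
--     return [
--         Degree.ZERO if count == 0 else Degree.ONE if count == 1 else Degree.MULTIPLE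
--         for count in incoming_counts
--     ]
-- ===== SOURCE B (Python) =====
-- from enum import IntEnum
--
-- class Degree(IntEnum):
--     ZERO = 0
--     ONE = 1
--     MULTIPLE = 2
--
-- def _compute_incoming_degree(
--     outgoing: list[list[tuple[int, int]]], node_count: int
-- ) -> list:
--     # Sort all sink indices; duplicates become adjacent, so a node's degree
--     # category is decided by comparing each sink with the previous one.
--     result = [Degree.ZERO] * node_count
--     prev = None
--     for sink in sorted(s for edges in outgoing for s, _ in edges):
--         result[sink] = Degree.MULTIPLE if sink == prev else Degree.ONE
--         prev = sink
--     return result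
-- ===== Notes on version B (the rewrite author's own statement) =====
-- stated objective: alternative
-- what changed: B replaces A's integer count array and final classification pass by sort-then-scan: it sorts the flattened sink indices, so duplicates become adjacent, and marks each node ONE on first sight and MULTIPLE when a sink equals its predecessor; no counts are ever kept. Pre_ restricts sink indices to the natural domain 0 <= sink < node_count: out-of-range sinks make A raise IndexError, and negative in-range sinks are malformed node ids on which A's negative-index wraparound aliases node node_count+sink.
-- outside the precondition, e.g. on _compute_incoming_degree([[(-1, 0), (1, 0)]], 2): A returns [0, 2], B returns [0, 1]
import Mathlib
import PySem

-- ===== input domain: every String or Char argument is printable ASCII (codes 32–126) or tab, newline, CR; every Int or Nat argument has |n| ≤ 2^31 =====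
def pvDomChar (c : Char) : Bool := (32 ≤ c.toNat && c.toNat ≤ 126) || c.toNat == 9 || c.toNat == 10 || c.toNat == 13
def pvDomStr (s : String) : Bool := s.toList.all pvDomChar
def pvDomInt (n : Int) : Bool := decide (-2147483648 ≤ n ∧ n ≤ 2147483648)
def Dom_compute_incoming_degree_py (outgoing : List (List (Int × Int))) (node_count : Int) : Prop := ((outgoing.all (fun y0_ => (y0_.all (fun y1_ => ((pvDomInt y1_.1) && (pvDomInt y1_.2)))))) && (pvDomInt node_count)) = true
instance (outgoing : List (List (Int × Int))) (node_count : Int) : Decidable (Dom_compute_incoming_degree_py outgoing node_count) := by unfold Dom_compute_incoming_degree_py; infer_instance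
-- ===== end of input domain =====

-- B sorts the flattened sink indices and classifies by comparing adjacent duplicates,
-- instead of A's count array plus classification pass (objective: alternative).

-- ===== PORT A =====
-- [0] * node_count : Python yields [] for node_count ≤ 0, matched by Int.toNat.
-- list update/read use PySem.List.pySetD / pyGetD (total forms; Pre_ keeps every index in range).
def compute_incoming_degree_py (outgoing : List (List (Int × Int))) (node_count : Int) : List Int :=
  let incoming_counts : List Int := List.replicate node_count.toNat 0
  let incoming_counts := outgoing.foldl (fun cs edges =>
    edges.foldl (fun cs p =>
      PySem.List.pySetD cs p.1 (PySem.List.pyGetD cs p.1 0 + 1)) cs) incoming_counts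
  incoming_counts.map (fun count => if count == 0 then (0 : Int) else if count == 1 then 1 else 2)

-- ===== PORT B =====
-- prev starts as Python None (Option Int); 'sink == prev' is comparison with an Option.
def compute_incoming_degree_py_alt (outgoing : List (List (Int × Int))) (node_count : Int) : List Int :=
  let result : List Int := List.replicate node_count.toNat 0
  let sinks := PySem.List.sorted (outgoing.flatMap (fun edges => edges.map (fun p => p.1))) (fun s => s) false
  (sinks.foldl (fun (st : List Int × Option Int) sink =>
      (PySem.List.pySetD st.1 sink (if some sink == st.2 then (2 : Int) else 1), some sink))
    (result, none)).1

-- ===== PRECONDITION & SPEC =====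
-- Pre_ restricts sink indices to the natural domain of node ids, 0 ≤ sink < node_count:
-- outside it A raises IndexError (sink < -node_count or sink ≥ node_count), and a negative
-- in-range sink is a malformed node id on which A's negative-index wraparound aliases
-- node node_count+sink (see the claim's cite, where A and B differ there).
def Pre_compute_incoming_degree_py (outgoing : List (List (Int × Int))) (node_count : Int) : Prop :=
  ∀ edges ∈ outgoing, ∀ p ∈ edges, 0 ≤ p.1 ∧ p.1 < node_count

instance (outgoing : List (List (Int × Int))) (node_count : Int) : Decidable (Pre_compute_incoming_degree_py outgoing node_count) := by unfold Pre_compute_incoming_degree_py; infer_instance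

def pvWitness_compute_incoming_degree_py : (List (List (Int × Int))) × Int :=
  ([[(0, 1), (2, 5)], [(0, 7)]], 3)

def Spec_compute_incoming_degree_py (outgoing : List (List (Int × Int))) (node_count : Int) (out : List Int) : Prop := out = compute_incoming_degree_py_alt outgoing node_count
instance (outgoing : List (List (Int × Int))) (node_count : Int) (out : List Int) : Decidable (Spec_compute_incoming_degree_py outgoing node_count out) := by unfold Spec_compute_incoming_degree_py; infer_instance

-- ===== CLAIM (what is proved, stated in full; the proofs are below) =====
def Claim_equal_compute_incoming_degree_py : Prop := ∀ (outgoing : List (List (Int × Int))) (node_count : Int), Dom_compute_incoming_degree_py outgoing node_count → Pre_compute_incoming_degree_py outgoing node_count → Spec_compute_incoming_degree_py outgoing node_count (compute_incoming_degree_py outgoing node_count)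

-- ===== LEMMAS AND PROOFS =====

-- A's nested loop is the loop over the flattened sink list
lemma nested_foldl (outgoing : List (List (Int × Int))) (g : List Int → Int → List Int) (cs : List Int) :
    outgoing.foldl (fun cs edges => edges.foldl (fun cs p => g cs p.1) cs) cs
      = (outgoing.flatMap (fun edges => edges.map (fun p => p.1))).foldl g cs := by
  induction outgoing generalizing cs with
  | nil => rfl
  | cons e rest ih =>
      simp only [List.foldl_cons, List.flatMap_cons, List.foldl_append, List.foldl_map]
      exact ih _

-- A's counting loop, characterised elementwise
lemma count_foldl (js : List Int) (cs : List Int)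
    (h : ∀ j ∈ js, 0 ≤ j ∧ j < (cs.length : Int)) :
    (js.foldl (fun cs j => PySem.List.pySetD cs j (PySem.List.pyGetD cs j 0 + 1)) cs).length = cs.length
    ∧ ∀ (k : Nat) (hk : k < cs.length),
      (js.foldl (fun cs j => PySem.List.pySetD cs j (PySem.List.pyGetD cs j 0 + 1)) cs)[k]?
        = some (cs[k] + (js.count (k : Int) : Int)) := by
  induction js generalizing cs with
  | nil => exact ⟨rfl, fun k hk => by simp [List.getElem?_eq_getElem hk]⟩
  | cons j rest ih =>
      obtain ⟨hj0, hjl⟩ := h j (List.mem_cons_self ..)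
      have hjn : j.toNat < cs.length := by omega
      have hstep : PySem.List.pySetD cs j (PySem.List.pyGetD cs j 0 + 1)
          = cs.set j.toNat (cs[j.toNat] + 1) := by
        rw [PySem.List.pySetD_of_nonneg _ _ hj0, PySem.List.pyGetD_eq_getElem _ _ hj0 hjl]
      have hlen : (cs.set j.toNat (cs[j.toNat] + 1)).length = cs.length := by simp
      obtain ⟨ihl, ihk⟩ := ih (cs.set j.toNat (cs[j.toNat] + 1))
        (by intro x hx; have := h x (List.mem_cons_of_mem _ hx); omega)
      constructor
      · simp only [List.foldl_cons]
        rw [hstep, ihl, hlen]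
      · intro k hk
        simp only [List.foldl_cons]
        rw [hstep, ihk k (by omega)]
        simp only [List.getElem_set, Option.some.injEq]
        by_cases he : j.toNat = k
        · have hjk : j = (k : Int) := by omega
          subst hjk
          simp only [Int.toNat_natCast, List.count_cons_self]
          push_cast
          ring
        · have hjk : j ≠ (k : Int) := by omega
          rw [List.count_cons_of_ne hjk]
          simp [he]

-- B's marking loop, characterised elementwise
lemma mark_foldl (js : List Int) (res : List Int) (prev : Option Int)
    (hs : js.Pairwise (· ≤ ·))
    (h : ∀ j ∈ js, 0 ≤ j ∧ j < (res.length : Int))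
    (hprev : ∀ p, prev = some p → ∀ j ∈ js, p ≤ j) :
    (js.foldl (fun (st : List Int × Option Int) sink =>
        (PySem.List.pySetD st.1 sink (if some sink == st.2 then (2 : Int) else 1), some sink))
      (res, prev)).1.length = res.length
    ∧ ∀ (k : Nat) (hk : k < res.length),
      (js.foldl (fun (st : List Int × Option Int) sink =>
          (PySem.List.pySetD st.1 sink (if some sink == st.2 then (2 : Int) else 1), some sink))
        (res, prev)).1[k]?
        = some (if js.count (k : Int) = 0 then res[k]
          else if prev = some (k : Int) then 2
          else if js.count (k : Int) = 1 then 1 else 2) := by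
  induction js generalizing res prev with
  | nil => exact ⟨rfl, fun k hk => by simp [List.getElem?_eq_getElem hk]⟩
  | cons s rest ih =>
      obtain ⟨hs0, hsl⟩ := h s (List.mem_cons_self ..)
      have hsn : s.toNat < res.length := by omega
      have hstep : PySem.List.pySetD res s (if some s == prev then (2 : Int) else 1)
          = res.set s.toNat (if prev = some s then 2 else 1) := by
        rw [PySem.List.pySetD_of_nonneg _ _ hs0]
        congr 1
        cases prev with
        | none => simp
        | some p =>
            by_cases hp : s = p
            · simp [hp]
            · simp [hp, Ne.symm hp]
      have hrest_ge : ∀ j ∈ rest, s ≤ j := fun j hj => (List.pairwise_cons.mp hs).1 j hj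
      have hlen' : (res.set s.toNat (if prev = some s then (2 : Int) else 1)).length = res.length := by simp
      obtain ⟨ihl, ihk⟩ := ih (res.set s.toNat (if prev = some s then (2 : Int) else 1)) (some s)
        ((List.pairwise_cons.mp hs).2)
        (by intro x hx; have := h x (List.mem_cons_of_mem _ hx); omega)
        (by intro p hp j hj; cases hp; exact hrest_ge j hj)
      constructor
      · simp only [List.foldl_cons]
        rw [hstep, ihl, hlen']
      · intro k hk
        simp only [List.foldl_cons]
        rw [hstep, ihk k (by omega)]
        simp only [List.getElem_set, Option.some.injEq]
        by_cases he : s.toNat = k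
        · -- the head sink is node k itself
          have hsk : s = (k : Int) := by omega
          subst hsk
          simp only [Int.toNat_natCast, List.count_cons_self]
          by_cases hc : rest.count ((k : Nat) : Int) = 0
          · simp [hc]
          · simp [hc]
        · -- the head sink is another node
          have hsk : s ≠ (k : Int) := by omega
          rw [List.count_cons_of_ne hsk]
          by_cases hc : rest.count (k : Int) = 0
          · simp [he, hc]
          · -- k occurs in rest, so prev = some k would force s = k
            have hkmem : (k : Int) ∈ rest := List.count_pos_iff.mp (Nat.pos_of_ne_zero hc)
            have hpk : ¬ (prev = some (k : Int)) := by
              intro hp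
              exact hsk (le_antisymm (hrest_ge _ hkmem) (hprev _ hp s (List.mem_cons_self ..)))
            simp [hc, hpk]
            exact fun hh => absurd hh hsk

-- ===== VERDICT (by name: the statement is the Claim_ definition above) =====
theorem compute_incoming_degree_py_spec : Claim_equal_compute_incoming_degree_py := by
  intro outgoing node_count _ hpre
  show compute_incoming_degree_py outgoing node_count = compute_incoming_degree_py_alt outgoing node_count
  unfold compute_incoming_degree_py compute_incoming_degree_py_alt
  dsimp only
  set flat := outgoing.flatMap (fun edges => edges.map (fun p => p.1)) with hflat
  set res0 : List Int := List.replicate node_count.toNat 0 with hres0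
  have hres0len : res0.length = node_count.toNat := by simp [hres0]
  have hbound : ∀ j ∈ flat, 0 ≤ j ∧ j < (res0.length : Int) := by
    intro j hj
    rw [hflat] at hj
    simp only [List.mem_flatMap, List.mem_map] at hj
    obtain ⟨edges, he, p, hp, rfl⟩ := hj
    obtain ⟨h0, h1⟩ := hpre edges he p hp
    rw [hres0len]
    omega
  rw [nested_foldl outgoing (fun cs j => PySem.List.pySetD cs j (PySem.List.pyGetD cs j 0 + 1)) res0]
  obtain ⟨hal, hak⟩ := count_foldl flat res0 hbound
  set js := PySem.List.sorted flat (fun s => s) false with hjs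
  have hperm : js.Perm flat := PySem.List.sorted_perm ..
  have hjb : ∀ j ∈ js, 0 ≤ j ∧ j < (res0.length : Int) :=
    fun j hj => hbound j (hperm.mem_iff.mp hj)
  obtain ⟨hbl, hbk⟩ := mark_foldl js res0 none
    (by simpa [hjs] using PySem.List.sorted_pairwise flat (fun s => s))
    hjb (by intro p hp; cases hp)
  apply List.ext_getElem?
  intro k
  by_cases hk : k < node_count.toNat
  · have hk' : k < res0.length := by omega
    rw [List.getElem?_map, hak k hk', hbk k hk']
    have hcount : js.count (k : Int) = flat.count (k : Int) := hperm.count_eq _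
    have hres0k : res0[k]'hk' = 0 := by simp [hres0]
    rw [hcount, hres0k]
    simp only [Option.map_some, Option.some.injEq, zero_add]
    by_cases h0 : flat.count (k : Int) = 0
    · simp [h0]
    · by_cases h1 : flat.count (k : Int) = 1
      · simp [h1]
      · have hne1 : ¬ ((flat.count (k : Int) : Int) = 1) := by exact_mod_cast h1
        simp [h0, h1, hne1]
  · rw [List.getElem?_map]
    rw [List.getElem?_eq_none (by rw [hal, hres0len]; omega),
        List.getElem?_eq_none (by rw [hbl, hres0len]; omega)]
    simp
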